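-- pv_equiv track=rewrite | github.com/tatp22/intersectionsim | linprog/simplex.py | getB
-- ===== SOURCE A (Python) =====
-- def getB(t_bounds,vMax,vMin,tiles,numCars):
--     '''Constructs B matrix'''
--     b = []
--
--     # Constraint 3: Correct way of crossing the intersection (doesn't go backwards)
--     x = 0
--     for r in range(0, len(t_bounds), 2):
--         if t_bounds[r] == "new car":
--             #the column of interest shifts one to the right if it concerns a new car
--             x += 1
--         else:
--             b.append(0)
--
--     # Constraint 4: tile can't be occupied by multiple cars at the time
--     for i in range(len(tiles)):
--         for j in range(i+1,len(tiles)):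
--             for k in range(len(tiles[i])):
--                 if tiles[i][k] in tiles[j]:
--                     b.append(-1)
--
--     return b
-- ===== SOURCE B (Python) =====
-- def getB(t_bounds, vMax, vMin, tiles, numCars):
--     '''Constructs B matrix'''
--     # Constraint 3: count the 0 entries, one per even index not labelled "new car"
--     zeros = sum(1 for r in range(0, len(t_bounds), 2) if t_bounds[r] != "new car")
--
--     # Constraint 4: inverted index tile-value -> list of tile indices containing it
--     index = {}
--     for j, t in enumerate(tiles):
--         for v in set(t):
--             index.setdefault(v, []).append(j)
--     negs = 0
--     for i, t in enumerate(tiles):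
--         for v in t:  # with multiplicity, as in A
--             negs += sum(1 for j in index.get(v, []) if j > i)
--
--     return [0] * zeros + [-1] * negs
-- ===== Notes on version B (the rewrite author's own statement) =====
-- stated objective: faster
-- what changed: Replaces A's pair-by-pair nested rescans with one inverted index (tile value -> list of tile indices containing it) built in a single pass; each occurrence in tiles[i] then counts the strictly-later indices in its index list, and the output is built as two replicate blocks instead of element-by-element appends.
import Mathlib
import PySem

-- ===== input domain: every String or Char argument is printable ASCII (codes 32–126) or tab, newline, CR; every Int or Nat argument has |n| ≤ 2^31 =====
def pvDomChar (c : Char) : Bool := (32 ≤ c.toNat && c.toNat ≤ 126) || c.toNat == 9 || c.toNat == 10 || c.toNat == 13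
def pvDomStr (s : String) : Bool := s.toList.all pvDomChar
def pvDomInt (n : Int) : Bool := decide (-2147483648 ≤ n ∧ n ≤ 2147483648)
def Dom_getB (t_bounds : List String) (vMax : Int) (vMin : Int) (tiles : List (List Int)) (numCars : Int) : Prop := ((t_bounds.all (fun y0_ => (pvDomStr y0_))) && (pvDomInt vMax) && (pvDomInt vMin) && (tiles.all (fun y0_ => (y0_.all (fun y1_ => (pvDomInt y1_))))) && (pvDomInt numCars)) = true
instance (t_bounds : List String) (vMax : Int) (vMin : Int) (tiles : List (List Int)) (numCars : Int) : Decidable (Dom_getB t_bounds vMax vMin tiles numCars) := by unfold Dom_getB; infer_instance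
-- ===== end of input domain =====

-- B replaces A's pair-by-pair rescans by one inverted index (value -> tile indices) plus
-- per-occurrence counting of strictly-later tiles, and emits the 0/-1 blocks as replications (faster).


-- ===== PORT A =====
-- Literal port of A. Every Python indexing (t_bounds[r], tiles[i], tiles[j], tiles[i][k]) is in
-- range, so pyGetD's defaults are never read; Python's `in` on a list is List.contains.
def getB (t_bounds : List String) (vMax : Int) (vMin : Int) (tiles : List (List Int)) (numCars : Int) : List Int :=
  let bx : List Int × Int :=
    (PySem.List.pyRange 0 (PySem.List.len t_bounds) 2).foldl
      (fun bx r =>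
        if PySem.List.pyGetD t_bounds r "" = "new car" then (bx.1, bx.2 + 1)
        else (bx.1 ++ [(0 : Int)], bx.2)) ([], 0)
  (PySem.List.pyRange 0 (PySem.List.len tiles)).foldl
    (fun b i =>
      (PySem.List.pyRange (i + 1) (PySem.List.len tiles)).foldl
        (fun b j =>
          (PySem.List.pyRange 0 (PySem.List.len (PySem.List.pyGetD tiles i []))).foldl
            (fun b k =>
              if (PySem.List.pyGetD tiles j []).contains
                   (PySem.List.pyGetD (PySem.List.pyGetD tiles i []) k 0)
              then b ++ [(-1 : Int)] else b) b) b) bx.1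

-- ===== PORT B =====
-- B-side helper: inverted index, tile value -> indices of the tiles whose set contains it.
def pvIndex (tiles : List (List Int)) : PySem.Dict Int (List Int) :=
  (PySem.List.enumerate tiles).foldl
    (fun d jt =>
      (PySem.Set.ofList jt.2).foldl
        (fun d v => d.insert v (d.getD v [] ++ [jt.1])) d)
    PySem.Dict.empty

def getB_alt (t_bounds : List String) (vMax : Int) (vMin : Int) (tiles : List (List Int)) (numCars : Int) : List Int :=
  let zeros : Int :=
    (PySem.List.pyRange 0 (PySem.List.len t_bounds) 2).foldl
      (fun acc r => if PySem.List.pyGetD t_bounds r "" ≠ "new car" then acc + 1 else acc) 0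
  let negs : Int :=
    (PySem.List.enumerate tiles).foldl
      (fun acc it =>
        it.2.foldl
          (fun acc v =>
            acc + (((pvIndex tiles).getD v []).countP (fun j => decide (it.1 < j)) : Int)) acc) 0
  PySem.List.pyRepeat [(0 : Int)] zeros ++ PySem.List.pyRepeat [(-1 : Int)] negs

-- ===== PRECONDITION & SPEC =====
def Spec_getB (t_bounds : List String) (vMax : Int) (vMin : Int) (tiles : List (List Int)) (numCars : Int) (out : List Int) : Prop := out = getB_alt t_bounds vMax vMin tiles numCars
instance (t_bounds : List String) (vMax : Int) (vMin : Int) (tiles : List (List Int)) (numCars : Int) (out : List Int) : Decidable (Spec_getB t_bounds vMax vMin tiles numCars out) := by unfold Spec_getB; infer_instance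

-- ===== CLAIM (what is proved, stated in full; the proofs are below) =====
def Claim_equal_getB : Prop := ∀ (t_bounds : List String) (vMax : Int) (vMin : Int) (tiles : List (List Int)) (numCars : Int), Dom_getB t_bounds vMax vMin tiles numCars → Spec_getB t_bounds vMax vMin tiles numCars (getB t_bounds vMax vMin tiles numCars)

-- ===== LEMMAS AND PROOFS =====

-- Number of elements of tiles[i] (with multiplicity) that occur in tiles[j].
def pvCnt (tiles : List (List Int)) (i j : Int) : Nat :=
  (PySem.List.pyGetD tiles i []).countP (fun v => (PySem.List.pyGetD tiles j []).contains v)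

-- zeros loop, A's shape (pair state; the second component is the dead counter x)
lemma pvZerosA (tb : List String) (L : List Int) (b0 : List Int) (x0 : Int) :
    (L.foldl (fun bx r =>
        if PySem.List.pyGetD tb r "" = "new car" then (bx.1, bx.2 + 1)
        else (bx.1 ++ [(0 : Int)], bx.2)) (b0, x0)).1
    = b0 ++ List.replicate (L.countP fun r => !(PySem.List.pyGetD tb r "" == "new car")) 0 := by
  induction L generalizing b0 x0 with
  | nil => simp
  | cons r L ih =>
    by_cases h : PySem.List.pyGetD tb r "" = "new car"
    · simp [h, ih]
    · simp [h, ih, List.replicate_succ, List.append_assoc]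

-- zeros loop, B's shape (counter)
lemma pvZerosB (tb : List String) (L : List Int) (a : Int) :
    L.foldl (fun acc r =>
        if PySem.List.pyGetD tb r "" ≠ "new car" then acc + 1 else acc) a
    = a + (L.countP fun r => !(PySem.List.pyGetD tb r "" == "new car") : Int) := by
  induction L generalizing a with
  | nil => simp
  | cons r L ih =>
    rw [List.foldl_cons]
    by_cases h : PySem.List.pyGetD tb r "" = "new car"
    · rw [if_neg (by simp [h]), ih, List.countP_cons]
      simp [h]
    · rw [if_pos h, ih, List.countP_cons]
      simp [h]
      ring

-- a loop that appends a replicate block at each step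
lemma pvFoldlAppendReplicate (g : Int → Nat) (c : Int) (L : List Int) (b0 : List Int) :
    L.foldl (fun b j => b ++ List.replicate (g j) c) b0
    = b0 ++ List.replicate ((L.map g).sum) c := by
  induction L generalizing b0 with
  | nil => simp
  | cons a L ih =>
    rw [List.foldl_cons, ih, List.map_cons, List.sum_cons, List.replicate_add, List.append_assoc]

-- A's innermost k-loop appends exactly pvCnt tiles i j copies of -1
lemma pvInnerA (tiles : List (List Int)) (i j : Int) (b : List Int) :
    (PySem.List.pyRange 0 (PySem.List.len (PySem.List.pyGetD tiles i []))).foldl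
      (fun b k =>
        if (PySem.List.pyGetD tiles j []).contains
             (PySem.List.pyGetD (PySem.List.pyGetD tiles i []) k 0)
        then b ++ [(-1 : Int)] else b) b
    = b ++ List.replicate (pvCnt tiles i j) (-1) := by
  rw [PySem.List.foldl_append_if
        (fun k => (PySem.List.pyGetD tiles j []).contains
                    (PySem.List.pyGetD (PySem.List.pyGetD tiles i []) k 0))
        (fun _ => (-1 : Int))]
  have hm := PySem.List.map_pyGetD_pyRange_zero (PySem.List.pyGetD tiles i []) 0
  have hc : (PySem.List.pyRange 0 (PySem.List.len (PySem.List.pyGetD tiles i []))).countP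
      (fun k => (PySem.List.pyGetD tiles j []).contains
                  (PySem.List.pyGetD (PySem.List.pyGetD tiles i []) k 0))
      = pvCnt tiles i j := by
    unfold pvCnt
    conv_rhs => rw [← hm]
    rw [List.countP_map]
    rfl
  rw [List.map_const', ← List.countP_eq_length_filter, hc]

-- inner set-loop of pvIndex: it appends jt.1 to index[v] exactly when v is in the tile
lemma pvSetFoldGetD (j : Int) (s : List Int) :
    ∀ (d : PySem.Dict Int (List Int)) (v : Int), s.Nodup →
      ((s.foldl (fun d w => d.insert w (d.getD w [] ++ [j])) d).getD v [])
      = d.getD v [] ++ (if v ∈ s then [j] else []) := by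
  induction s with
  | nil => intro d v _; simp
  | cons a s ih =>
    intro d v hs
    have ha : a ∉ s := (List.nodup_cons.mp hs).1
    have hs' : s.Nodup := (List.nodup_cons.mp hs).2
    rw [List.foldl_cons, ih _ v hs', PySem.Dict.getD_insert]
    by_cases hv : v = a
    · subst hv; simp [ha]
    · simp [hv, List.mem_cons]

-- characterisation of a countP over the inverted index being built
lemma pvIndexCount (ps : List (Int × List Int)) (p : Int → Bool) (v : Int) :
    ∀ (d : PySem.Dict Int (List Int)),
      ((ps.foldl (fun d jt =>
          (PySem.Set.ofList jt.2).foldl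
            (fun d w => d.insert w (d.getD w [] ++ [jt.1])) d) d).getD v []).countP p
      = ((d.getD v []).countP p) + ps.countP (fun q => p q.1 && q.2.contains v) := by
  induction ps with
  | nil => intro d; simp
  | cons q ps ih =>
    intro d
    rw [List.foldl_cons, ih, pvSetFoldGetD q.1 (PySem.Set.ofList q.2) d v
          (PySem.Set.nodup_ofList q.2), List.countP_append, List.countP_cons]
    by_cases hm : v ∈ q.2
    · have hmem : v ∈ PySem.Set.ofList q.2 := (PySem.Set.mem_ofList _ _).mpr hm
      have hcont : q.2.contains v = true := by simpa using hm
      rw [if_pos hmem]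
      cases hp : p q.1 <;> simp [hp, hm] <;> omega
    · have hmem : v ∉ PySem.Set.ofList q.2 := fun h => hm ((PySem.Set.mem_ofList _ _).mp h)
      have hcont : q.2.contains v = false := by simpa using hm
      rw [if_neg hmem]
      simp [hm]

-- 0/1 sum is countP (Nat version)
lemma pvSumIte {B : Type} (ys : List B) (p : B → Bool) :
    (ys.map (fun b => if p b then 1 else 0)).sum = ys.countP p := by
  induction ys with
  | nil => simp
  | cons b ys ih =>
    cases hp : p b <;> simp [hp, ih] <;> omega

-- exchange of the two summations
lemma pvSwapCount {A B : Type} (xs : List A) (ys : List B) (P : A → B → Bool) :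
    (xs.map (fun a => ys.countP (P a))).sum
    = (ys.map (fun b => xs.countP (fun a => P a b))).sum := by
  induction xs with
  | nil => simp
  | cons a xs ih =>
    have : (ys.map (fun b => xs.countP (fun a => P a b) + if P a b then 1 else 0)).sum
        = (ys.map (fun b => xs.countP (fun a => P a b))).sum
          + (ys.map (fun b => if P a b then 1 else 0)).sum := List.sum_map_add
    simp only [List.map_cons, List.sum_cons, List.countP_cons, this, ih, pvSumIte]
    omega

-- a guarded count collapses
lemma pvCountGuard (c : Bool) (t : List Int) (m : Int → Bool) :
    t.countP (fun v => c && m v) = if c then t.countP m else 0 := by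
  cases c <;> simp

-- B's negs-loop as a sum
lemma pvNegsB (tiles : List (List Int)) :
    (PySem.List.enumerate tiles).foldl
      (fun acc it =>
        it.2.foldl
          (fun acc v =>
            acc + (((pvIndex tiles).getD v []).countP (fun j => decide (it.1 < j)) : Int)) acc) 0
    = ((PySem.List.enumerate tiles).map (fun it =>
        (it.2.map (fun v =>
          (((pvIndex tiles).getD v []).countP (fun j => decide (it.1 < j)) : Int))).sum)).sum := by
  have h : (fun (acc : Int) (it : Int × List Int) =>
      it.2.foldl
        (fun acc v =>
          acc + (((pvIndex tiles).getD v []).countP (fun j => decide (it.1 < j)) : Int)) acc)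
      = fun acc it => acc + (it.2.map (fun v =>
          (((pvIndex tiles).getD v []).countP (fun j => decide (it.1 < j)) : Int))).sum := by
    funext acc it
    exact PySem.List.foldl_add _ _ acc
  rw [h, PySem.List.foldl_add]
  simp

-- per-tile identity: occurrence-wise counting over the index = pairwise counting over later tiles
lemma pvPerTile (tiles : List (List Int)) (i : Int) (h0 : 0 ≤ i)
    (hn : i < PySem.List.len tiles) :
    ((PySem.List.pyGetD tiles i []).map (fun v =>
        (PySem.List.pyRange 0 (PySem.List.len tiles)).countP
          (fun j => decide (i < j) && (PySem.List.pyGetD tiles j []).contains v))).sum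
    = ((PySem.List.pyRange (i + 1) (PySem.List.len tiles)).map (fun j => pvCnt tiles i j)).sum := by
  rw [pvSwapCount]
  rw [PySem.List.pyRange_one_append 0 (i + 1) (PySem.List.len tiles) (by omega) (by omega)]
  rw [List.map_append, List.sum_append]
  have h1 : ((PySem.List.pyRange 0 (i + 1)).map (fun j =>
      (PySem.List.pyGetD tiles i []).countP
        (fun v => decide (i < j) && (PySem.List.pyGetD tiles j []).contains v))).sum = 0 := by
    apply List.sum_eq_zero
    intro x hx
    rcases List.mem_map.mp hx with ⟨j, hj, rfl⟩
    have hji : j < i + 1 := (PySem.List.mem_pyRange_one.mp hj).2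
    rw [pvCountGuard]
    simp [show ¬ (i < j) by omega]
  have h2 : ((PySem.List.pyRange (i + 1) (PySem.List.len tiles)).map (fun j =>
      (PySem.List.pyGetD tiles i []).countP
        (fun v => decide (i < j) && (PySem.List.pyGetD tiles j []).contains v))).sum
      = ((PySem.List.pyRange (i + 1) (PySem.List.len tiles)).map (fun j => pvCnt tiles i j)).sum := by
    congr 1
    apply List.map_congr_left
    intro j hj
    have hij : i + 1 ≤ j := (PySem.List.mem_pyRange_one.mp hj).1
    rw [pvCountGuard, if_pos (by simp only [decide_eq_true_eq]; omega)]
    rfl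
  rw [h1, h2, Nat.zero_add]

-- ===== VERDICT (by name: the statement is the Claim_ definition above) =====
theorem getB_spec : Claim_equal_getB := by
  intro t_bounds vMax vMin tiles numCars _
  unfold Spec_getB getB getB_alt
  dsimp only
  -- zeros part
  rw [pvZerosA, pvZerosB, PySem.List.pyRepeat_singleton, PySem.List.pyRepeat_singleton]
  -- A's nested loops: each i contributes a replicate block
  have hF : (fun (b : List Int) (i : Int) =>
      (PySem.List.pyRange (i + 1) (PySem.List.len tiles)).foldl
        (fun b j =>
          (PySem.List.pyRange 0 (PySem.List.len (PySem.List.pyGetD tiles i []))).foldl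
            (fun b k =>
              if (PySem.List.pyGetD tiles j []).contains
                   (PySem.List.pyGetD (PySem.List.pyGetD tiles i []) k 0)
              then b ++ [(-1 : Int)] else b) b) b)
      = fun b i => b ++ List.replicate
          (((PySem.List.pyRange (i + 1) (PySem.List.len tiles)).map (fun j => pvCnt tiles i j)).sum)
          (-1) := by
    funext b i
    have hG : (fun (b : List Int) (j : Int) =>
        (PySem.List.pyRange 0 (PySem.List.len (PySem.List.pyGetD tiles i []))).foldl
          (fun b k =>
            if (PySem.List.pyGetD tiles j []).contains
                 (PySem.List.pyGetD (PySem.List.pyGetD tiles i []) k 0)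
            then b ++ [(-1 : Int)] else b) b)
        = fun b j => b ++ List.replicate (pvCnt tiles i j) (-1) := by
      funext b j
      exact pvInnerA tiles i j b
    rw [hG, pvFoldlAppendReplicate]
  rw [hF, pvFoldlAppendReplicate]
  -- B's negs as the same number
  rw [pvNegsB]
  -- rewrite the index counts and identify the two sums
  have hE := PySem.List.enumerate_eq_map_pyRange tiles []
  have hidx : ∀ (i v : Int),
      (((pvIndex tiles).getD v []).countP (fun j => decide (i < j)) : Nat)
      = (PySem.List.pyRange 0 (PySem.List.len tiles)).countP
          (fun j => decide (i < j) && (PySem.List.pyGetD tiles j []).contains v) := by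
    intro i v
    unfold pvIndex
    rw [pvIndexCount]
    have : ((PySem.Dict.empty : PySem.Dict Int (List Int)).getD v []).countP
        (fun j => decide (i < j)) = 0 := rfl
    rw [this, Nat.zero_add, hE, List.countP_map]
    rfl
  have hsum : ((PySem.List.enumerate tiles).map (fun it =>
        (it.2.map (fun v =>
          (((pvIndex tiles).getD v []).countP (fun j => decide (it.1 < j)) : Int))).sum)).sum
      = (((PySem.List.pyRange 0 (PySem.List.len tiles)).map (fun i =>
          ((PySem.List.pyRange (i + 1) (PySem.List.len tiles)).map
            (fun j => pvCnt tiles i j)).sum)).sum : Nat) := by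
    rw [hE, List.map_map]
    have : ∀ i ∈ PySem.List.pyRange 0 (PySem.List.len tiles),
        (((fun it : Int × List Int =>
            (it.2.map (fun v =>
              (((pvIndex tiles).getD v []).countP (fun j => decide (it.1 < j)) : Int))).sum)
           ∘ fun j => (j, PySem.List.pyGetD tiles j [])) i)
        = (((PySem.List.pyRange (i + 1) (PySem.List.len tiles)).map
            (fun j => pvCnt tiles i j)).sum : Int) := by
      intro i hi
      have hib := PySem.List.mem_pyRange_one.mp hi
      simp only [Function.comp]
      have : ((PySem.List.pyGetD tiles i []).map (fun v =>
          (((pvIndex tiles).getD v []).countP (fun j => decide (i < j)) : Int))).sum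
          = (((PySem.List.pyGetD tiles i []).map (fun v =>
              ((PySem.List.pyRange 0 (PySem.List.len tiles)).countP
                (fun j => decide (i < j) && (PySem.List.pyGetD tiles j []).contains v)))).sum : Nat) := by
        rw [Nat.cast_list_sum, List.map_map]
        congr 1
        apply List.map_congr_left
        intro v _
        simp only [Function.comp]
        rw [hidx i v]
      rw [this, pvPerTile tiles i hib.1 hib.2]
    rw [List.map_congr_left this]
    rw [Nat.cast_list_sum, List.map_map]
    rfl
  rw [hsum]
  congr 2
  simp
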